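-- pv_equiv track=rewrite | github.com/Azhaku/Hacker-rank-Python-Solutions | MountBlue Tech/045. Separate the Numbers.py | generateNums
-- ===== SOURCE A (Python) =====
-- def generateNums(s,itr):
--     if len(s)==1:
--         return 0
--     prev = int(s[:itr])
--     ns = s[:itr]
--     while True:
--         if len(ns) >= len(s):
--             break
--         ns += str(prev+1)
--         prev = prev+1
--     if ns == s:
--         return 1
--     return 0
-- ===== SOURCE B (Python) =====
-- def generateNums(s, itr):
--     if len(s) == 1:
--         return 0
--     prev = int(s[:itr])
--     rest = s[itr:]
--     while rest:
--         nxt = str(prev + 1)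
--         if not rest.startswith(nxt):
--             return 0
--         rest = rest[len(nxt):]
--         prev += 1
--     return 1
-- ===== Notes on version B (the rewrite author's own statement) =====
-- stated objective: faster
-- what changed: B never builds the concatenation: it consumes the suffix s[itr:] chunk by chunk with startswith, shrinking the remaining string and failing early on the first mismatch, instead of A's append-every-number then one whole-string compare.
import Mathlib
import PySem

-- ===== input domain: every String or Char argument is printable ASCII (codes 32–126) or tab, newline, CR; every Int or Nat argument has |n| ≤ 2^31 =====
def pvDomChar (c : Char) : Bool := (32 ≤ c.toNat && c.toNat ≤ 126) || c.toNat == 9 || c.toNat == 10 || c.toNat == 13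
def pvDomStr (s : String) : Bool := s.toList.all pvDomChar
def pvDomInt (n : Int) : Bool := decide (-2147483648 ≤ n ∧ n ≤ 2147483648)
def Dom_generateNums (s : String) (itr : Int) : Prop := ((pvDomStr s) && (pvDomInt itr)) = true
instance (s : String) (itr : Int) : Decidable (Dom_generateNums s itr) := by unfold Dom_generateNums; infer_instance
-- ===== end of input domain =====

-- B never builds A's concatenation: it consumes the suffix s[itr:] chunk by chunk with
-- startswith, failing early on the first mismatch (objective: faster, constant-factor).


-- ===== PORT A =====
-- str(n) is never the empty string (needed by both ports for termination)
theorem pvToDigitsCoreNeNil : ∀ (f n : Nat) (acc : List Char), acc ≠ [] → Nat.toDigitsCore 10 f n acc ≠ [] := by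
  intro f
  induction f with
  | zero => intro n acc h; simpa [Nat.toDigitsCore] using h
  | succ f ih =>
    intro n acc h
    simp only [Nat.toDigitsCore]
    split
    · simp
    · exact ih _ _ (by simp)

theorem pvToCharsLenPos (n : Int) : 0 < (PySem.Int.toChars n).length := by
  have td : ∀ m : Nat, Nat.toDigits 10 m ≠ [] := by
    intro m
    simp only [Nat.toDigits, Nat.toDigitsCore]
    split
    · simp
    · exact pvToDigitsCoreNeNil _ _ _ (by simp)
  unfold PySem.Int.toChars
  split
  · simp
  · simpa [List.length_pos_iff] using td n.toNat

-- A's 'while True: if len(ns) >= len(s): break; ns += str(prev+1); prev += 1'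
def genALoop (cs : List Char) (ns : List Char) (prev : Int) : List Char :=
  if cs.length ≤ ns.length then ns
  else genALoop cs (ns ++ PySem.Int.toChars (prev + 1)) (prev + 1)
termination_by cs.length - ns.length
decreasing_by
  have := pvToCharsLenPos (prev + 1)
  simp only [List.length_append]
  omega

def generateNums (s : String) (itr : Int) : Int :=
  let cs := s.toList
  if cs.length == 1 then 0
  else
    let pre := PySem.List.slice cs none (some itr)      -- s[:itr]
    match PySem.Int.ofChars? pre with                   -- int(s[:itr]); Pre_ makes it parse
    | none => 0
    | some prev =>
      if genALoop cs pre prev == cs then 1 else 0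

-- ===== PORT B =====
-- B's 'while rest: nxt = str(prev+1); if not rest.startswith(nxt): return 0; rest = rest[len(nxt):]'
-- rest.startswith(nxt) = nxt.isPrefixOf rest (exact); rest[len(nxt):] with a nonnegative
-- in-range start is rest.drop nxt.length (exact).
def genBScan (rest : List Char) (prev : Int) : Bool :=
  if h : rest.isEmpty then true
  else
    let nxt := PySem.Int.toChars (prev + 1)
    if nxt.isPrefixOf rest then genBScan (rest.drop nxt.length) (prev + 1)
    else false
termination_by rest.length
decreasing_by
  have h1 := pvToCharsLenPos (prev + 1)
  have h2 : 0 < rest.length := by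
    cases rest with
    | nil => simp at h
    | cons a t => simp
  simp only [List.length_drop]
  omega

def generateNums_alt (s : String) (itr : Int) : Int :=
  let cs := s.toList
  if cs.length == 1 then 0
  else
    match PySem.Int.ofChars? (PySem.List.slice cs none (some itr)) with  -- prev = int(s[:itr])
    | none => 0
    | some prev =>
      if genBScan (PySem.List.slice cs (some itr) none) prev then 1 else 0  -- rest = s[itr:]

-- ===== PRECONDITION & SPEC =====
-- Pre_ excludes exactly the inputs where int(s[:itr]) raises ValueError (both A and B raise
-- there); the len(s)==1 guard returns before the parse, so length-1 strings are always admitted.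
def Pre_generateNums (s : String) (itr : Int) : Prop :=
  s.toList.length = 1 ∨
    (PySem.Int.ofChars? (PySem.List.slice s.toList none (some itr))).isSome = true
instance (s : String) (itr : Int) : Decidable (Pre_generateNums s itr) := by
  unfold Pre_generateNums; infer_instance
def pvWitness_generateNums : String × Int := ("1234", 1)

def Spec_generateNums (s : String) (itr : Int) (out : Int) : Prop := out = generateNums_alt s itr
instance (s : String) (itr : Int) (out : Int) : Decidable (Spec_generateNums s itr out) := by unfold Spec_generateNums; infer_instance

-- ===== CLAIM (what is proved, stated in full; the proofs are below) =====
def Claim_equal_generateNums : Prop := ∀ (s : String) (itr : Int), Dom_generateNums s itr → Pre_generateNums s itr → Spec_generateNums s itr (generateNums s itr)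

-- ===== LEMMAS AND PROOFS =====

-- A's loop only ever appends: its argument is a prefix of its result.
theorem genALoop_prefix (cs ns : List Char) (prev : Int) : ns <+: genALoop cs ns prev := by
  unfold genALoop
  split
  · exact List.prefix_refl ns
  · exact List.IsPrefix.trans (List.prefix_append ns _) (genALoop_prefix cs _ (prev + 1))
termination_by cs.length - ns.length
decreasing_by
  have := pvToCharsLenPos (prev + 1)
  simp only [List.length_append]
  omega

-- Core bridge: B's suffix consumption from cs.drop pos succeeds iff A's build starting
-- from ns = cs.take pos reproduces cs exactly.
theorem genBScan_iff (cs : List Char) (pos : Nat) (prev : Int) (hpos : pos ≤ cs.length) :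
    genBScan (cs.drop pos) prev = true ↔ genALoop cs (cs.take pos) prev = cs := by
  unfold genBScan genALoop
  by_cases h : pos < cs.length
  · have hne : ¬ (cs.drop pos).isEmpty := by
      simp [List.isEmpty_iff, List.drop_eq_nil_iff]; omega
    have hlenA : ¬ cs.length ≤ (cs.take pos).length := by
      simp only [List.length_take]; omega
    rw [dif_neg hne, if_neg hlenA]
    set nxt := PySem.Int.toChars (prev + 1) with hnxt
    by_cases hm : (cs.drop pos).take nxt.length = nxt
    · -- chunk matches: align the two loops' next states
      have hpref : nxt.isPrefixOf (cs.drop pos) = true := by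
        rw [List.isPrefixOf_iff_prefix]
        exact hm ▸ List.take_prefix _ _
      rw [if_pos hpref]
      have hfit : pos + nxt.length ≤ cs.length := by
        have : ((cs.drop pos).take nxt.length).length = nxt.length := by rw [hm]
        simp only [List.length_take, List.length_drop] at this
        omega
      have htake : cs.take (pos + nxt.length) = cs.take pos ++ nxt := by
        rw [List.take_add, hm]
      rw [show cs.take pos ++ nxt = cs.take (pos + nxt.length) from htake.symm,
          List.drop_drop]
      exact genBScan_iff cs (pos + nxt.length) (prev + 1) hfit
    · -- chunk mismatches: B returns false; A's final string cannot be cs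
      have hpref : ¬ nxt.isPrefixOf (cs.drop pos) = true := by
        rw [List.isPrefixOf_iff_prefix]
        intro hp
        exact hm (List.prefix_iff_eq_take.mp hp).symm
      rw [if_neg hpref]
      simp only [Bool.false_eq_true, false_iff]
      intro hcontr
      have hpre : cs.take pos ++ nxt <+: cs := by
        have hp := genALoop_prefix cs (cs.take pos ++ nxt) (prev + 1)
        rwa [hcontr] at hp
      apply hm
      obtain ⟨t, ht⟩ := hpre
      have hdrop : cs.drop pos = nxt ++ t := by
        have h1 : cs.drop pos = (cs.take pos ++ (nxt ++ t)).drop pos := by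
          rw [← List.append_assoc, ht]
        rw [h1, List.drop_append_of_le_length (by simp only [List.length_take]; omega)]
        have h2 : (cs.take pos).drop pos = [] := by
          apply List.drop_eq_nil_of_le
          simp only [List.length_take]; omega
        rw [h2, List.nil_append]
      rw [hdrop, List.take_append_of_le_length (le_refl _), List.take_length]
  · -- pos = cs.length: B's rest is empty, A breaks immediately with ns = cs
    have hpe : pos = cs.length := by omega
    simp [hpe]
termination_by cs.length - pos
decreasing_by
  have := pvToCharsLenPos (prev + 1)
  omega

-- s[:itr] and s[itr:] are a matching take/drop pair at one index k ≤ len.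
theorem slice_pair (cs : List Char) (b : Int) :
    ∃ k, k ≤ cs.length ∧ PySem.List.slice cs none (some b) = cs.take k ∧
      PySem.List.slice cs (some b) none = cs.drop k := by
  by_cases hb : 0 ≤ b
  · by_cases hble : b.toNat ≤ cs.length
    · exact ⟨b.toNat, hble, PySem.List.slice_to cs hb, PySem.List.slice_from cs hb⟩
    · refine ⟨cs.length, le_refl _, ?_, ?_⟩
      · rw [PySem.List.slice_to cs hb, List.take_of_length_le (by omega), List.take_length]
      · rw [PySem.List.slice_from cs hb, List.drop_eq_nil_of_le (by omega),
            List.drop_length]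
  · have hk : 0 < b.natAbs := by omega
    have hbe : -((b.natAbs : ℕ) : Int) = b := by omega
    have hto := PySem.List.slice_to_neg_natCast cs (k := b.natAbs) hk
    have hfr := PySem.List.slice_from_neg_natCast cs (k := b.natAbs) hk
    rw [hbe] at hto hfr
    exact ⟨cs.length - b.natAbs, by omega, hto, hfr⟩

-- ===== VERDICT (by name: the statement is the Claim_ definition above) =====
theorem generateNums_spec : Claim_equal_generateNums := by
  intro s itr _hdom _hpre
  unfold Spec_generateNums generateNums generateNums_alt
  set cs := s.toList with hcs
  by_cases h1 : cs.length == 1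
  · simp [h1]
  · simp only [h1, Bool.false_eq_true, if_false]
    obtain ⟨k, hk, hto, hfr⟩ := slice_pair cs itr
    rcases hp : PySem.Int.ofChars? (PySem.List.slice cs none (some itr)) with _ | prev
    · rfl
    · simp only []
      rw [hto, hfr]
      have hiff := genBScan_iff cs k prev hk
      by_cases hb : genBScan (cs.drop k) prev = true
      · have hA : (genALoop cs (cs.take k) prev == cs) = true :=
          beq_iff_eq.mpr (hiff.mp hb)
        rw [if_pos hA, if_pos hb]
      · have hA : ¬ (genALoop cs (cs.take k) prev == cs) = true := by
          simpa using fun hc => hb (hiff.mpr hc)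
        rw [if_neg hA, if_neg hb]
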